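-- pv_equiv track=rewrite | github.com/vadim566/laragames | SVN/trunk/Code/Python/lara_align_words.py | segmented_text_to_labelled_text
-- ===== SOURCE A (Python) =====
-- def segmented_text_to_labelled_text(SegmentedText):
--     ( LabelledText, Index, LabelIndex ) = ( '', 0, 1 )
--     while True:
--         NextSeparatorIndex = SegmentedText.find("||", Index)
--         if NextSeparatorIndex < 0:
--             return LabelledText + SegmentedText[Index:]
--         else:
--             LabelledText += ( SegmentedText[Index:NextSeparatorIndex] + f'|{LabelIndex}|' )
--             Index = NextSeparatorIndex + len('||')
--             LabelIndex += 1
-- ===== SOURCE B (Python) =====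
-- def segmented_text_to_labelled_text(SegmentedText):
--     parts = SegmentedText.split("||")
--     result = parts[0]
--     for i, tok in enumerate(parts[1:], start=1):
--         result += f'|{i}|' + tok
--     return result
-- ===== Notes on version B (the rewrite author's own statement) =====
-- stated objective: idiomatic
-- what changed: A's while-loop that repeatedly calls str.find on the double-bar separator and slices piece by piece is replaced by one up-front str.split on that separator followed by a single enumerate loop over the tail tokens that inserts the numbered labels.
import Mathlib
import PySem

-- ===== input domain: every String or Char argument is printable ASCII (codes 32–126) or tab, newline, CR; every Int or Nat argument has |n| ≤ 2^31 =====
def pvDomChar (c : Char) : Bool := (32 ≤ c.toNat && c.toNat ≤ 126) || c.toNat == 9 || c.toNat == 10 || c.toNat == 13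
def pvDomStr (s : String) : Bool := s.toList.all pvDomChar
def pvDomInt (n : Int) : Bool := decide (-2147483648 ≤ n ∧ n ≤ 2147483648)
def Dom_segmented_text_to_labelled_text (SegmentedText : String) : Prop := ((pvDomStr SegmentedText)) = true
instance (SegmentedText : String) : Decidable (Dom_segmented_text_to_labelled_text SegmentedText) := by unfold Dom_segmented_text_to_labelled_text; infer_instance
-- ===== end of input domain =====

-- B replaces A's position-advancing find/slice scan by one split("||") followed by a single
-- enumerate loop over the tail tokens (objective: idiomatic; same asymptotic cost).

-- ===== PORT A =====
-- Fact cited by pvLoopA's decreasing_by (the port needs it for termination):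
-- s.find(sub, k) is -1 once k is past the end of s (the end bound is clamped below the start).
theorem pvFindFrom_gt (s sub : List Char) (k : Nat) (h : s.length < k) :
    PySem.Chars.findFrom s sub (k : Int) none = -1 := by
  simp only [PySem.Chars.findFrom]
  have h0 : ¬ ((k : Int) < 0) := by omega
  rw [if_neg h0, if_pos (by exact_mod_cast h)]

-- The while-loop of A, with its state (LabelledText, Index, LabelIndex) as arguments.
def pvLoopA (s : List Char) (labelled : List Char) (index : Nat) (j : Int) : List Char :=
  let nxt := PySem.Chars.findFrom s ['|','|'] (index : Int) none
  if _h : nxt < 0 then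
    labelled ++ PySem.Chars.slice s (some (index : Int)) none
  else
    pvLoopA s
      (labelled ++ PySem.Chars.slice s (some (index : Int)) (some nxt)
        ++ ('|' :: (PySem.Int.toChars j ++ ['|'])))
      (nxt.toNat + 2) (j + 1)
termination_by s.length - index
decreasing_by
  simp only [not_lt] at _h
  by_cases hk : index ≤ s.length
  · have hne : PySem.Chars.findFrom s ['|','|'] (index : Int) none ≠ -1 := by omega
    obtain ⟨h1, h2, -⟩ := PySem.Chars.findFrom_natCast_spec s ['|','|'] index hk hne
    have h3 := h2.length_le
    simp only [List.length_drop, List.length_cons, List.length_nil] at h3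
    omega
  · have := pvFindFrom_gt s ['|','|'] index (by omega)
    omega

def segmented_text_to_labelled_text (SegmentedText : String) : String :=
  String.ofList (pvLoopA SegmentedText.toList [] 0 1)

-- ===== PORT B =====
def segmented_text_to_labelled_text_alt (SegmentedText : String) : String :=
  let parts := PySem.Chars.splitOn SegmentedText.toList ['|','|']
  String.ofList ((PySem.List.enumerate (parts.drop 1) 1).foldl
    (fun acc p => acc ++ ('|' :: (PySem.Int.toChars p.1 ++ ['|'])) ++ p.2)
    (PySem.List.pyGetD parts 0 []))

-- ===== PRECONDITION & SPEC =====
def Spec_segmented_text_to_labelled_text (SegmentedText : String) (out : String) : Prop := out = segmented_text_to_labelled_text_alt SegmentedText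
instance (SegmentedText : String) (out : String) : Decidable (Spec_segmented_text_to_labelled_text SegmentedText out) := by unfold Spec_segmented_text_to_labelled_text; infer_instance

-- ===== CLAIM (what is proved, stated in full; the proofs are below) =====
def Claim_equal_segmented_text_to_labelled_text : Prop := ∀ (SegmentedText : String), Dom_segmented_text_to_labelled_text SegmentedText → Spec_segmented_text_to_labelled_text SegmentedText (segmented_text_to_labelled_text SegmentedText)

-- ===== LEMMAS AND PROOFS =====

theorem pvFind_nil : PySem.Chars.find [] ['|','|'] = -1 := by decide

-- If "||" occurs in t, the first occurrence plus the separator fits inside t.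
theorem pvFind_facts (t : List Char) (h : PySem.Chars.find t ['|','|'] ≠ -1) :
    0 ≤ PySem.Chars.find t ['|','|'] ∧ (PySem.Chars.find t ['|','|']).toNat + 2 ≤ t.length := by
  have h0 : 0 ≤ PySem.Chars.find t ['|','|'] := by
    have := PySem.Chars.neg_one_le_find t ['|','|']; omega
  obtain ⟨hp, -⟩ := PySem.Chars.find_spec h0
  have := hp.length_le
  simp only [List.length_drop, List.length_cons, List.length_nil] at this
  exact ⟨h0, by omega⟩

-- The pieces t.split("||") yields, as a structural recursion on first occurrences.
def pvSplit (t : List Char) : List (List Char) :=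
  if h : PySem.Chars.find t ['|','|'] = -1 then [t]
  else t.take (PySem.Chars.find t ['|','|']).toNat ::
       pvSplit (t.drop ((PySem.Chars.find t ['|','|']).toNat + 2))
termination_by t.length
decreasing_by
  obtain ⟨-, h2⟩ := pvFind_facts t h
  simp only [List.length_drop]
  omega

theorem pvSplit_ne_nil (t : List Char) : pvSplit t ≠ [] := by
  rw [pvSplit]; split <;> simp

-- '|{j}|'
def pvLabel (j : Int) : List Char := '|' :: (PySem.Int.toChars j ++ ['|'])

-- The common normal form both programs are reduced to: pieces interleaved with numbered labels.
def pvRenderTail : List (List Char) → Int → List Char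
  | [], _ => []
  | q :: qs, j => pvLabel j ++ q ++ pvRenderTail qs (j + 1)

def pvRender : List (List Char) → Int → List Char
  | [], _ => []
  | p :: ps, j => p ++ pvRenderTail ps j

theorem pvPrefix_find_zero (l : List Char) (h : ['|','|'] <+: l) :
    PySem.Chars.find l ['|','|'] = 0 := by
  have h0 : 0 ≤ PySem.Chars.find l ['|','|'] := by
    rw [PySem.Chars.find_nonneg_iff]; exact h.isInfix
  obtain ⟨-, hmin⟩ := PySem.Chars.find_spec h0
  by_contra hne
  have hpos : 0 < (PySem.Chars.find l ['|','|']).toNat := by omega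
  exact hmin 0 hpos (by simpa using h)

theorem pvFind_cons (c : Char) (rest : List Char) (h : ¬ (['|','|'] <+: (c :: rest))) :
    PySem.Chars.find (c :: rest) ['|','|'] =
      if PySem.Chars.find rest ['|','|'] = -1 then -1 else 1 + PySem.Chars.find rest ['|','|'] := by
  split
  case isTrue hr =>
    rw [PySem.Chars.find_eq_neg_one_iff] at hr ⊢
    intro hinf
    obtain ⟨j, hj⟩ := (PySem.Chars.exists_prefix_drop_iff_isIn _ _).mpr
      ((PySem.Chars.isIn_iff_infix _ _).mpr hinf)
    match j, hj with
    | 0, hj => exact h (by simpa using hj)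
    | j+1, hj =>
      exact hr ((PySem.Chars.isIn_iff_infix _ _).mp
        ((PySem.Chars.exists_prefix_drop_iff_isIn _ _).mp ⟨j, by simpa using hj⟩))
  case isFalse hr =>
    have hm : 0 ≤ PySem.Chars.find rest ['|','|'] := by
      have := PySem.Chars.neg_one_le_find rest ['|','|']; omega
    obtain ⟨hp₂, hmin₂⟩ := PySem.Chars.find_spec hm
    have hk : 0 ≤ PySem.Chars.find (c :: rest) ['|','|'] := by
      rw [PySem.Chars.find_nonneg_iff]
      exact List.infix_cons ((PySem.Chars.find_nonneg_iff rest _).mp hm)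
    obtain ⟨hp₁, hmin₁⟩ := PySem.Chars.find_spec hk
    set k := PySem.Chars.find (c :: rest) ['|','|'] with hkdef
    set m := PySem.Chars.find rest ['|','|'] with hmdef
    have hk1 : 1 ≤ k.toNat := by
      by_contra hz
      have : k.toNat = 0 := by omega
      rw [this] at hp₁
      exact h (by simpa using hp₁)
    have hub : k.toNat ≤ m.toNat + 1 := by
      by_contra hgt
      exact hmin₁ (m.toNat + 1) (by omega) (by simpa using hp₂)
    have hlb : m.toNat ≤ k.toNat - 1 := by
      by_contra hgt
      have heq : k.toNat = (k.toNat - 1) + 1 := by omega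
      rw [heq, List.drop_succ_cons] at hp₁
      exact hmin₂ (k.toNat - 1) (by omega) hp₁
    omega

-- split("||")'s fuelled scanner computes pvSplit (with the open piece cur prepended to the head).
theorem pvGo_eq (fuel : Nat) : ∀ (l cur : List Char) (acc : List (List Char)), l.length ≤ fuel →
    PySem.Chars.splitOn.go ['|','|'] fuel l cur acc =
      acc.reverse ++ (match pvSplit l with
        | [] => []
        | p :: ps => (cur.reverse ++ p) :: ps) := by
  induction fuel with
  | zero =>
    intro l cur acc hl
    have hnl : l = [] := List.eq_nil_of_length_eq_zero (by omega)
    subst hnl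
    rw [PySem.Chars.splitOn.go, pvSplit]
    simp [pvFind_nil]
  | succ fuel ih =>
    intro l cur acc hl
    match l with
    | [] =>
      rw [PySem.Chars.splitOn.go, pvSplit]
      · simp [pvFind_nil]
      · omega
    | c :: rest =>
      rw [PySem.Chars.splitOn.go]
      by_cases hpre : List.isPrefixOf ['|','|'] (c :: rest)
      · rw [if_pos hpre]
        have hpre' : ['|','|'] <+: (c :: rest) := List.isPrefixOf_iff_prefix.mp hpre
        have hfind : PySem.Chars.find (c :: rest) ['|','|'] = 0 := pvPrefix_find_zero _ hpre'
        have hlen : (List.drop (['|','|'] : List Char).length (c :: rest)).length ≤ fuel := by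
          simp only [List.length_drop, List.length_cons, List.length_nil]
          simp only [List.length_cons] at hl; omega
        rw [ih _ _ _ hlen]
        conv_rhs => rw [pvSplit]
        rw [dif_neg (by rw [hfind]; norm_num)]
        simp only [hfind, Int.toNat_zero, List.take_zero, Nat.zero_add]
        obtain ⟨p, ps, hps⟩ : ∃ p ps, pvSplit (List.drop 2 (c :: rest)) = p :: ps := by
          rcases hq : pvSplit (List.drop 2 (c :: rest)) with _ | ⟨p, ps⟩
          · exact absurd hq (pvSplit_ne_nil _)
          · exact ⟨p, ps, rfl⟩
        show List.reverse (cur.reverse :: acc) ++ _ = _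
        simp only [List.length_cons, List.length_nil] at hps ⊢
        rw [hps]
        simp
      · rw [if_neg hpre]
        have hpre' : ¬ (['|','|'] <+: (c :: rest)) := fun hc => hpre (List.isPrefixOf_iff_prefix.mpr hc)
        have hlen : rest.length ≤ fuel := by simp only [List.length_cons] at hl; omega
        rw [ih _ _ _ hlen]
        have hshift := pvFind_cons c rest hpre'
        conv_rhs => rw [pvSplit]
        by_cases hr : PySem.Chars.find rest ['|','|'] = -1
        · rw [dif_pos (by rw [hshift, if_pos hr])]
          conv_lhs => rw [pvSplit, dif_pos hr]
          simp
        · have hm0 : 0 ≤ PySem.Chars.find rest ['|','|'] := by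
            have := PySem.Chars.neg_one_le_find rest ['|','|']; omega
          rw [dif_neg (by rw [hshift, if_neg hr]; omega)]
          conv_lhs => rw [pvSplit, dif_neg hr]
          have ht : (PySem.Chars.find (c :: rest) ['|','|']).toNat
              = (PySem.Chars.find rest ['|','|']).toNat + 1 := by
            rw [hshift, if_neg hr]; omega
          rw [ht]
          simp [List.take_succ_cons, List.drop_succ_cons]

theorem pvSplitOn_eq (l : List Char) :
    PySem.Chars.splitOn l ['|','|'] = pvSplit l := by
  show PySem.Chars.splitOn.go ['|','|'] (l.length + 1) l [] [] = _
  rw [pvGo_eq (l.length + 1) l [] [] (by omega)]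
  obtain ⟨p, ps, hps⟩ : ∃ p ps, pvSplit l = p :: ps := by
    rcases hq : pvSplit l with _ | ⟨p, ps⟩
    · exact absurd hq (pvSplit_ne_nil _)
    · exact ⟨p, ps, rfl⟩
  rw [hps]
  simp

-- B's enumerate-loop accumulates exactly the label/token normal form.
theorem pvFoldl_enum (ps : List (List Char)) : ∀ (j : Int) (init : List Char),
    (PySem.List.enumerate ps j).foldl
      (fun acc p => acc ++ ('|' :: (PySem.Int.toChars p.1 ++ ['|'])) ++ p.2) init
    = init ++ pvRenderTail ps j := by
  induction ps with
  | nil => intro j init; simp [PySem.List.enumerate_nil, pvRenderTail]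
  | cons q qs ih =>
    intro j init
    rw [PySem.List.enumerate_cons]
    simp only [List.foldl_cons, ih, pvRenderTail, pvLabel]
    simp

-- A's loop, started anywhere inside the string, renders the split of the remaining suffix.
theorem pvLoopA_eq (s : List Char) : ∀ (n index : Nat) (labelled : List Char) (j : Int),
    s.length - index = n → index ≤ s.length →
    pvLoopA s labelled index j = labelled ++ pvRender (pvSplit (s.drop index)) j := by
  intro n
  induction n using Nat.strong_induction_on with
  | _ n ih =>
    intro index labelled j hn hle
    rw [pvLoopA]
    simp only [PySem.Chars.findFrom_natCast s ['|','|'] index hle]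
    by_cases hr : PySem.Chars.find (List.drop index s) ['|','|'] = -1
    · rw [dif_pos (by rw [if_pos hr]; norm_num)]
      conv_rhs => rw [pvSplit, dif_pos hr]
      simp only [pvRender, pvRenderTail]
      simp [PySem.List.slice_from_natCast]
    · obtain ⟨hm0, hm2⟩ := pvFind_facts _ hr
      set m := PySem.Chars.find (List.drop index s) ['|','|'] with hmdef
      rw [dif_neg (by rw [if_neg hr]; omega)]
      rw [if_neg hr]
      have htn : ((index : Int) + m).toNat = index + m.toNat := by omega
      have hlen_t : (List.drop index s).length = s.length - index := by simp
      rw [ih (s.length - (((index:Int) + m).toNat + 2)) (by omega) _ _ _ rfl (by omega)]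
      rw [htn]
      have hdrop : List.drop (index + m.toNat + 2) s
          = List.drop (m.toNat + 2) (List.drop index s) := by
        rw [List.drop_drop]; ring_nf
      conv_rhs => rw [pvSplit, dif_neg hr]
      obtain ⟨q, qs, hqs⟩ : ∃ q qs, pvSplit (List.drop (m.toNat + 2) (List.drop index s)) = q :: qs := by
        rcases hq : pvSplit (List.drop (m.toNat + 2) (List.drop index s)) with _ | ⟨q, qs⟩
        · exact absurd hq (pvSplit_ne_nil _)
        · exact ⟨q, qs, rfl⟩
      have hslice : PySem.Chars.slice s (some (index : Int)) (some ((index : Int) + m))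
          = (List.drop index s).take m.toNat := by
        rw [PySem.Chars.slice_eq_listSlice, PySem.List.slice_toNat _ (by omega) (by omega)]
        congr 1
        omega
      rw [hslice, hdrop, ← hmdef, hqs]
      simp only [pvRender, pvRenderTail, pvLabel]
      simp

-- ===== VERDICT (by name: the statement is the Claim_ definition above) =====
theorem segmented_text_to_labelled_text_spec : Claim_equal_segmented_text_to_labelled_text := by
  intro s _
  unfold Spec_segmented_text_to_labelled_text
  unfold segmented_text_to_labelled_text segmented_text_to_labelled_text_alt
  rw [pvLoopA_eq s.toList (s.toList.length - 0) 0 [] 1 rfl (by omega)]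
  rw [pvSplitOn_eq]
  obtain ⟨p, ps, hps⟩ : ∃ p ps, pvSplit s.toList = p :: ps := by
    rcases hq : pvSplit s.toList with _ | ⟨p, ps⟩
    · exact absurd hq (pvSplit_ne_nil _)
    · exact ⟨p, ps, rfl⟩
  simp only [List.drop_zero, hps, List.drop_one, List.tail_cons,
    PySem.List.pyGetD_zero_cons, pvFoldl_enum, pvRender]
  simp
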